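-- pv_equiv track=rewrite | github.com/box/wavectl | test/util.py | compareRsrcs
-- ===== SOURCE A (Python) =====
-- def compareRsrcs(r1, r2, compareKeys):
--     """ Return that the compareKeys in r1 and r2 are equal to each other"""
--     compK = set(compareKeys)
--     visitedKeys = 0
--     for k1, v1 in r1.items():
--         if k1 in compK:
--             visitedKeys = visitedKeys + 1
--             v2 = r2.get(k1, "")
--             if v1 != v2:
--                 return False
--
--     # If a key was missing in both the r1 and r2, they are considered equal too.
--     # Look at keys that are missing in both and consider them as visited
--     for k in compK:
--         foundIn1 = r1.get(k)
--         foundIn2 = r2.get(k)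
--         if foundIn1 is None and foundIn2 is None:
--             visitedKeys = visitedKeys + 1
--
--     # If we are returning true make sure that we have really compared all
--     # keys.
--     assert(visitedKeys == len(compK)
--            and "Not all compareKeys were considered")
--     return True
-- ===== SOURCE B (Python) =====
-- def compareRsrcs(r1, r2, compareKeys):
--     """Return that the compareKeys in r1 and r2 are equal to each other."""
--     return all(r1.get(k, "") == r2.get(k, "") for k in set(compareKeys))
-- ===== Notes on version B (the rewrite author's own statement) =====
-- stated objective: simpler
-- what changed: One fused pass over set(compareKeys) comparing r1.get(k,"") with r2.get(k,""), replacing A's two loops (scan of r1.items plus a second scan of the key set), the visited counter and the assertion.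
import Mathlib
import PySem

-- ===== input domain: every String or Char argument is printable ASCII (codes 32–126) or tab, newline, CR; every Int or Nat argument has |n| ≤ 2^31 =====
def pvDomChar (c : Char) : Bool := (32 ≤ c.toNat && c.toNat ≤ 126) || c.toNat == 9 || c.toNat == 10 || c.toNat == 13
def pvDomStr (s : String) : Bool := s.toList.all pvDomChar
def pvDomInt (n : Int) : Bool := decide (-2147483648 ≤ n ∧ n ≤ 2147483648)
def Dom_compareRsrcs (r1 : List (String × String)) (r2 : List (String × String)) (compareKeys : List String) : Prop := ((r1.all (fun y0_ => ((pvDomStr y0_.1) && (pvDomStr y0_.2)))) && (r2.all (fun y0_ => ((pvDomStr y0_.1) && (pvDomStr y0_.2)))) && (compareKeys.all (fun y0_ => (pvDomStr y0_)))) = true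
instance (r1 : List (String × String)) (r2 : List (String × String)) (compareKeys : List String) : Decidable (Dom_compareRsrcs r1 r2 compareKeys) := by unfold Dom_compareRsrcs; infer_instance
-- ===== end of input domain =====

-- ===== PORT A =====
-- B is one fused pass over set(compareKeys) with .get(k, "") on both dicts; A's two loops,
-- counter and assertion disappear. Equal wherever A returns; A's AssertionError inputs are outside Pre_.

-- first loop of A: scan d1.items, count visited compare keys, early-return False (none) on a mismatch
def compareRsrcsLoop1 (compK : PySem.Set String) (d2 : PySem.Dict String String) :
    List (String × String) → Nat → Option Nat
  | [], visited => some visited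
  | (k1, v1) :: rest, visited =>
    if PySem.Set.contains compK k1 then
      let visited' := visited + 1
      let v2 := PySem.Dict.getD d2 k1 ""
      if v1 != v2 then none
      else compareRsrcsLoop1 compK d2 rest visited'
    else compareRsrcsLoop1 compK d2 rest visited

def compareRsrcs (r1 : List (String × String)) (r2 : List (String × String)) (compareKeys : List String) : Bool :=
  let compK : PySem.Set String := PySem.Set.ofList compareKeys
  let d1 := PySem.Dict.ofList r1
  let d2 := PySem.Dict.ofList r2
  match compareRsrcsLoop1 compK d2 d1.items 0 with
  | none => false
  | some visitedKeys =>
    -- second loop: count compare keys missing from both dicts (order-independent consumption of the set)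
    let visitedKeys2 := compK.foldl
      (fun n k => if (PySem.Dict.get? d1 k) == none && (PySem.Dict.get? d2 k) == none then n + 1 else n)
      visitedKeys
    -- assert visitedKeys2 == len(compK): the failing inputs (AssertionError) are excluded by Pre_
    if visitedKeys2 = PySem.Set.len compK then true else true

-- ===== PORT B =====
def compareRsrcs_alt (r1 : List (String × String)) (r2 : List (String × String)) (compareKeys : List String) : Bool :=
  let d1 := PySem.Dict.ofList r1
  let d2 := PySem.Dict.ofList r2
  (PySem.Set.ofList compareKeys).all
    (fun k => PySem.Dict.getD d1 k "" == PySem.Dict.getD d2 k "")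

-- ===== PRECONDITION & SPEC =====
-- Pre_ is exactly where A returns: either some compare key present in r1 mismatches (early False),
-- or no compare key is missing from r1 while present in r2 (so the assertion passes). On the excluded
-- inputs A raises AssertionError; B simply returns whether all keys compare equal under the "" default.
def Pre_compareRsrcs (r1 : List (String × String)) (r2 : List (String × String)) (compareKeys : List String) : Prop :=
  (∃ k ∈ compareKeys, (PySem.Dict.ofList r1).contains k = true ∧
      (PySem.Dict.ofList r1).getD k "" ≠ (PySem.Dict.ofList r2).getD k "") ∨
  (∀ k ∈ compareKeys, (PySem.Dict.ofList r1).contains k = true ∨ (PySem.Dict.ofList r2).contains k = false)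
instance (r1 : List (String × String)) (r2 : List (String × String)) (compareKeys : List String) : Decidable (Pre_compareRsrcs r1 r2 compareKeys) := by unfold Pre_compareRsrcs; infer_instance

def pvWitness_compareRsrcs : (List (String × String)) × (List (String × String)) × List String :=
  ([("a", "x"), ("b", "y")], [("a", "x")], ["a", "b", "c"])


def Spec_compareRsrcs (r1 : List (String × String)) (r2 : List (String × String)) (compareKeys : List String) (out : Bool) : Prop := out = compareRsrcs_alt r1 r2 compareKeys
instance (r1 : List (String × String)) (r2 : List (String × String)) (compareKeys : List String) (out : Bool) : Decidable (Spec_compareRsrcs r1 r2 compareKeys out) := by unfold Spec_compareRsrcs; infer_instance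

-- ===== CLAIM (what is proved, stated in full; the proofs are below) =====
def Claim_equal_compareRsrcs : Prop := ∀ (r1 : List (String × String)) (r2 : List (String × String)) (compareKeys : List String), Dom_compareRsrcs r1 r2 compareKeys → Pre_compareRsrcs r1 r2 compareKeys → Spec_compareRsrcs r1 r2 compareKeys (compareRsrcs r1 r2 compareKeys)

-- ===== LEMMAS AND PROOFS =====
-- A's first loop returns none iff some item of d1 with a compare key mismatches r2
lemma compareRsrcsLoop1_eq_none_iff (compK : PySem.Set String) (d2 : PySem.Dict String String)
    (items : List (String × String)) (v : Nat) :
    compareRsrcsLoop1 compK d2 items v = none ↔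
      ∃ p ∈ items, PySem.Set.contains compK p.1 = true ∧ p.2 ≠ PySem.Dict.getD d2 p.1 "" := by
  induction items generalizing v with
  | nil => simp [compareRsrcsLoop1]
  | cons p rest ih =>
    obtain ⟨k1, v1⟩ := p
    simp only [compareRsrcsLoop1]
    by_cases hk : PySem.Set.contains compK k1 = true
    · rw [if_pos hk]
      by_cases hv : v1 = PySem.Dict.getD d2 k1 ""
      · rw [if_neg (by simp [hv]), ih]
        constructor
        · rintro ⟨q, hq, h⟩; exact ⟨q, List.mem_cons_of_mem _ hq, h⟩
        · rintro ⟨q, hq, h⟩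
          rcases List.mem_cons.mp hq with rfl | hq
          · exact absurd hv (by simpa using h.2)
          · exact ⟨q, hq, h⟩
      · rw [if_pos (by simpa [bne_iff_ne] using hv)]
        exact ⟨fun _ => ⟨(k1, v1), List.mem_cons_self, hk, hv⟩, fun _ => rfl⟩
    · rw [if_neg hk, ih]
      constructor
      · rintro ⟨q, hq, h⟩; exact ⟨q, List.mem_cons_of_mem _ hq, h⟩
      · rintro ⟨q, hq, h⟩
        rcases List.mem_cons.mp hq with rfl | hq
        · exact absurd h.1 hk
        · exact ⟨q, hq, h⟩

-- the item-wise mismatch of the loop is exactly the key-wise mismatch Pre_ speaks about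
lemma mismatch_iff (r1 r2 : List (String × String)) (compareKeys : List String) :
    (∃ p ∈ (PySem.Dict.ofList r1).items, PySem.Set.contains (PySem.Set.ofList compareKeys) p.1 = true ∧
        p.2 ≠ PySem.Dict.getD (PySem.Dict.ofList r2) p.1 "") ↔
      ∃ k ∈ compareKeys, (PySem.Dict.ofList r1).contains k = true ∧
        (PySem.Dict.ofList r1).getD k "" ≠ (PySem.Dict.ofList r2).getD k "" := by
  constructor
  · rintro ⟨⟨k, v⟩, hmem, hk, hne⟩
    have hget : (PySem.Dict.ofList r1).get? k = some v :=
      PySem.Dict.get?_of_mem_items _ hmem (PySem.Dict.nodup_keys_ofList r1)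
    refine ⟨k, (PySem.Set.mem_ofList _ _).mp ((PySem.Set.contains_iff _ _).mp hk), ?_, ?_⟩
    · rw [PySem.Dict.contains_eq_isSome_get?, hget]; rfl
    · rw [PySem.Dict.getD_of_get?_eq_some _ _ hget]; exact hne
  · rintro ⟨k, hkmem, hc, hne⟩
    have hs : ((PySem.Dict.ofList r1).get? k).isSome = true := by
      rw [← PySem.Dict.contains_eq_isSome_get?]; exact hc
    obtain ⟨v, hget⟩ := Option.isSome_iff_exists.mp hs
    refine ⟨(k, v), PySem.Dict.mem_items_of_get?_eq_some _ hget, ?_, ?_⟩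
    · exact (PySem.Set.contains_iff _ _).mpr ((PySem.Set.mem_ofList _ _).mpr hkmem)
    · rw [← PySem.Dict.getD_of_get?_eq_some _ "" hget]; exact hne

-- ===== VERDICT (by name: the statement is the Claim_ definition above) =====
theorem compareRsrcs_spec : Claim_equal_compareRsrcs := by
  intro r1 r2 compareKeys _ hpre
  unfold Spec_compareRsrcs
  simp only [compareRsrcs, compareRsrcs_alt]
  by_cases hm : ∃ k ∈ compareKeys, (PySem.Dict.ofList r1).contains k = true ∧
      (PySem.Dict.ofList r1).getD k "" ≠ (PySem.Dict.ofList r2).getD k ""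
  · -- a mismatch exists: A returns False early, B's all is false at that key
    have hnone := (compareRsrcsLoop1_eq_none_iff (PySem.Set.ofList compareKeys)
      (PySem.Dict.ofList r2) (PySem.Dict.ofList r1).items 0).mpr
      ((mismatch_iff r1 r2 compareKeys).mpr hm)
    obtain ⟨k, hkmem, hc, hne⟩ := hm
    have hB : ((PySem.Set.ofList compareKeys).all
        (fun k => PySem.Dict.getD (PySem.Dict.ofList r1) k "" == PySem.Dict.getD (PySem.Dict.ofList r2) k "")) = false := by
      rw [List.all_eq_false]
      refine ⟨k, show k ∈ PySem.Set.ofList compareKeys from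
        (PySem.Set.mem_ofList _ _).mpr hkmem, by simpa using hne⟩
    rw [hnone]
    dsimp only
    exact hB.symm
  · -- no mismatch: A passes the assertion and returns True; B's all is true, because Pre_
    -- rules out a compare key missing from r1 but present in r2
    rcases hpre with hp | hp
    · exact absurd hp hm
    have hsome : compareRsrcsLoop1 (PySem.Set.ofList compareKeys) (PySem.Dict.ofList r2)
        (PySem.Dict.ofList r1).items 0 ≠ none := by
      rw [Ne, compareRsrcsLoop1_eq_none_iff, mismatch_iff]; exact hm
    have hB : ((PySem.Set.ofList compareKeys).all
        (fun k => PySem.Dict.getD (PySem.Dict.ofList r1) k "" == PySem.Dict.getD (PySem.Dict.ofList r2) k "")) = true := by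
      rw [List.all_eq_true]
      intro k hk
      have hkmem := (PySem.Set.mem_ofList _ _).mp hk
      by_cases hc : (PySem.Dict.ofList r1).contains k = true
      · by_cases he : (PySem.Dict.ofList r1).getD k "" = (PySem.Dict.ofList r2).getD k ""
        · simpa using he
        · exact absurd ⟨k, hkmem, hc, he⟩ hm
      · have hc2 : (PySem.Dict.ofList r2).contains k = false := by
          rcases hp k hkmem with h | h
          · exact absurd h hc
          · exact h
        rw [PySem.Dict.getD_of_not_contains _ _ (by simpa using hc),
            PySem.Dict.getD_of_not_contains _ _ hc2]
        rfl
    obtain ⟨visited, hA⟩ := Option.ne_none_iff_exists'.mp hsome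
    rw [hA]
    dsimp only
    rw [hB]
    split <;> rfl
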